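-- pv_equiv track=rewrite | github.com/krstian-estbn/cs11-project-pyxel | world/map.py | initial_player_pos
-- ===== SOURCE A (Python) =====
-- def initial_player_pos(level):
--     s = (-1, -1)
--     mushrooms = 0
--     for r, row in enumerate(level):
--         for c, cell in enumerate(row):
--                 if cell == '+':
--                     mushrooms += 1
--                     continue
--                 if cell == "L":
--                     s = (r, c)
--     return (s, mushrooms)
-- ===== SOURCE B (Python) =====
-- def initial_player_pos(level):
--     mushrooms = sum(row.count('+') for row in level)
--     for r, row in reversed(list(enumerate(level))):
--         if 'L' in row:
--             c = len(row) - 1 - row[::-1].index('L')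
--             return ((r, c), mushrooms)
--     return ((-1, -1), mushrooms)
-- ===== Notes on version B (the rewrite author's own statement) =====
-- stated objective: alternative
-- what changed: A's single forward row-major nested pass with mutable last-seen state is replaced by a sum-of-row-counts for the mushrooms plus a reverse short-circuiting search that returns at the last row containing 'L', taking its last 'L' column.
import Mathlib
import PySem

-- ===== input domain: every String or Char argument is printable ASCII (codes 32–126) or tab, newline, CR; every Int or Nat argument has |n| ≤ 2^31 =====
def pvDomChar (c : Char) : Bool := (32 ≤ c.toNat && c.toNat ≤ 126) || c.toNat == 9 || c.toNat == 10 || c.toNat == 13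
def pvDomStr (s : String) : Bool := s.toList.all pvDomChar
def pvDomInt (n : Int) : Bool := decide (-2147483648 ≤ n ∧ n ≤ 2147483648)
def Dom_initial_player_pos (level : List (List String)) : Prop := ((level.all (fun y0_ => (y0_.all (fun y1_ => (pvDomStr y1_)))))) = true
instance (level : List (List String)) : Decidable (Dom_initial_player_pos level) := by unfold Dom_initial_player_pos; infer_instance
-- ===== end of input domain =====

-- B replaces A's single forward row-major pass (mutable last-seen 'L' state + mushroom counter)
-- by a sum of per-row '+' counts plus a reverse short-circuiting row search for the last 'L';
-- objective: alternative (genuinely different traversal, same cost).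


-- ===== PORT A =====
-- literal port of A: one nested forward fold over enumerate, state ((s), mushrooms)
def initial_player_pos (level : List (List String)) : (Int × Int) × Int :=
  (PySem.List.enumerate level).foldl
    (fun sm p =>
      (PySem.List.enumerate p.2).foldl
        (fun sm2 q =>
          if q.2 = "+" then (sm2.1, sm2.2 + 1)       -- mushrooms += 1; continue
          else if q.2 = "L" then ((p.1, q.1), sm2.2) -- s = (r, c)
          else sm2)
        sm)
    ((-1, -1), 0)

-- ===== PORT B =====
-- the 'for r, row in reversed(list(enumerate(level)))' loop with early return;
-- row[::-1] is ported as row.reverse (PySem.List.slice?_none_none_neg_one)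
def initial_player_pos_alt_loop (m : Int) : List (Int × List String) → (Int × Int) × Int
  | [] => ((-1, -1), m)
  | (r, row) :: rest =>
    if "L" ∈ row then
      ((r, (row.length : Int) - 1 - (((PySem.List.index? row.reverse "L").getD 0 : Nat) : Int)), m)
    else initial_player_pos_alt_loop m rest

def initial_player_pos_alt (level : List (List String)) : (Int × Int) × Int :=
  let mushrooms : Int := (level.map (fun row => (PySem.List.count row "+" : Int))).sum
  initial_player_pos_alt_loop mushrooms (PySem.List.enumerate level).reverse

-- ===== PRECONDITION & SPEC =====
def Spec_initial_player_pos (level : List (List String)) (out : (Int × Int) × Int) : Prop := out = initial_player_pos_alt level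
instance (level : List (List String)) (out : (Int × Int) × Int) : Decidable (Spec_initial_player_pos level out) := by unfold Spec_initial_player_pos; infer_instance

-- ===== CLAIM (what is proved, stated in full; the proofs are below) =====
def Claim_equal_initial_player_pos : Prop := ∀ (level : List (List String)), Dom_initial_player_pos level → Spec_initial_player_pos level (initial_player_pos level)

-- ===== LEMMAS AND PROOFS =====

-- column B picks in a row containing "L" (= last index of "L")
def pvLastC (row : List String) : Int :=
  (row.length : Int) - 1 - (((PySem.List.index? row.reverse "L").getD 0 : Nat) : Int)

-- B's loop with the mushroom count factored out
def pvFind : List (Int × List String) → Option (Int × Int)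
  | [] => none
  | (r, row) :: rest => if "L" ∈ row then some (r, pvLastC row) else pvFind rest

theorem pvLoop_eq_find (m : Int) (xs : List (Int × List String)) :
    initial_player_pos_alt_loop m xs = ((pvFind xs).getD (-1, -1), m) := by
  induction xs with
  | nil => rfl
  | cons p rest ih =>
    obtain ⟨r, row⟩ := p
    simp only [initial_player_pos_alt_loop, pvFind, pvLastC]
    split_ifs <;> simp [ih]

theorem pvLastC_snoc_L (row : List String) : pvLastC (row ++ ["L"]) = (row.length : Int) := by
  simp [pvLastC, PySem.List.index?]

theorem pvLastC_snoc_ne (row : List String) (x : String) (hx : x ≠ "L") (hm : "L" ∈ row) :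
    pvLastC (row ++ [x]) = pvLastC row := by
  have h1 : PySem.List.index? (row ++ [x]).reverse "L"
      = (PySem.List.index? row.reverse "L").map (· + 1) := by
    rw [List.reverse_append]
    simpa using PySem.List.index?_cons_of_ne row.reverse hx
  obtain ⟨k, hk⟩ := Option.isSome_iff_exists.mp
    ((PySem.List.index?_isSome_iff row.reverse "L").mpr (by simpa using hm))
  simp only [pvLastC, h1, hk, Option.map_some, Option.getD_some, List.length_append,
    List.length_cons, List.length_nil]
  push_cast
  omega

-- A's inner loop over one row
theorem pvInner_eq (r : Int) (row : List String) (s : Int × Int) (m : Int) :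
    (PySem.List.enumerate row).foldl
      (fun sm2 q =>
        if q.2 = "+" then (sm2.1, sm2.2 + 1)
        else if q.2 = "L" then ((r, q.1), sm2.2)
        else sm2)
      (s, m)
    = ((if "L" ∈ row then (r, pvLastC row) else s), m + (PySem.List.count row "+" : Int)) := by
  induction row using List.reverseRecOn generalizing s m with
  | nil => simp [PySem.List.enumerate, PySem.List.count]
  | append_singleton row x ih =>
    rw [PySem.List.enumerate_append, List.foldl_append, ih]
    simp only [PySem.List.enumerate, List.foldl]
    by_cases hL : x = "L"
    · subst hL
      have hx : ("L" : String) ≠ "+" := by decide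
      simp [hx, pvLastC_snoc_L, PySem.List.count_eq, List.count_append]
    · have hmem : ("L" ∈ row ++ [x]) ↔ "L" ∈ row := by
        simp only [List.mem_append, List.mem_singleton]
        exact or_iff_left (fun h => hL h.symm)
      by_cases hx : x = "+"
      · subst hx
        by_cases hL2 : "L" ∈ row
        · simp [hmem, hL2, PySem.List.count_eq, List.count_append,
            pvLastC_snoc_ne row "+" (by decide) hL2, add_assoc]
        · simp [hmem, hL2, PySem.List.count_eq, List.count_append, add_assoc]
      · by_cases hL2 : "L" ∈ row
        · simp [hx, hL, hmem, hL2, PySem.List.count_eq, List.count_append,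
            pvLastC_snoc_ne row x hL hL2]
        · simp [hx, hL, hmem, hL2, PySem.List.count_eq, List.count_append]

-- main invariant for the outer loops
theorem pvMain (level : List (List String)) (k : Int) (s : Int × Int) (m : Int) :
    (PySem.List.enumerate level k).foldl
      (fun sm p =>
        (PySem.List.enumerate p.2).foldl
          (fun sm2 q =>
            if q.2 = "+" then (sm2.1, sm2.2 + 1)
            else if q.2 = "L" then ((p.1, q.1), sm2.2)
            else sm2)
          sm)
      (s, m)
    = ((pvFind (PySem.List.enumerate level k).reverse).getD s,
       m + (level.map (fun row => (PySem.List.count row "+" : Int))).sum) := by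
  induction level using List.reverseRecOn generalizing s m with
  | nil => simp [PySem.List.enumerate, pvFind]
  | append_singleton level row ih =>
    rw [PySem.List.enumerate_append, List.foldl_append, ih]
    simp only [PySem.List.enumerate, List.foldl, List.reverse_append, List.reverse_cons,
      List.reverse_nil, List.nil_append, List.cons_append, List.map_append, List.sum_append]
    rw [pvInner_eq]
    simp only [pvFind]
    split_ifs with h
    · simp [add_assoc]
    · cases hf : pvFind (PySem.List.enumerate level k).reverse <;> simp [add_assoc]

-- ===== VERDICT (by name: the statement is the Claim_ definition above) =====
theorem initial_player_pos_spec : Claim_equal_initial_player_pos := by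
  intro level _
  show initial_player_pos level = initial_player_pos_alt level
  unfold initial_player_pos initial_player_pos_alt
  rw [pvMain, pvLoop_eq_find]
  simp
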